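-- pv_equiv track=rewrite | github.com/bitwise-labs/Automation | Python/pyBitwiseAutomation/BitwiseDevice.py | unpackValueByKey
-- ===== SOURCE A (Python) =====
-- def unpackValueByKey(string: str, key: str) -> str:
--     lines = string.split("\n")
--     retn = None
--     for tok in lines:
--         if tok.startswith(key+" ") or tok.startswith(key+"=") or tok.startswith(key+"\t") or tok.startswith(key+",") :
--             retn = tok[len(key)+1:]
--
--     if retn == None:
--         raise Exception("[Key_Not_Found]")
--
--     return retn
-- ===== SOURCE B (Python) =====
-- def unpackValueByKey(string: str, key: str) -> str:
--     for tok in reversed(string.split("\n")):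
--         if tok.startswith(key + " ") or tok.startswith(key + "=") or tok.startswith(key + "\t") or tok.startswith(key + ","):
--             return tok[len(key) + 1:]
--     raise Exception("[Key_Not_Found]")
-- ===== Notes on version B (the rewrite author's own statement) =====
-- stated objective: alternative
-- what changed: B searches the lines from the end and returns on the first match (early exit), instead of A's full forward scan that keeps overwriting the last match.
import Mathlib
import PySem

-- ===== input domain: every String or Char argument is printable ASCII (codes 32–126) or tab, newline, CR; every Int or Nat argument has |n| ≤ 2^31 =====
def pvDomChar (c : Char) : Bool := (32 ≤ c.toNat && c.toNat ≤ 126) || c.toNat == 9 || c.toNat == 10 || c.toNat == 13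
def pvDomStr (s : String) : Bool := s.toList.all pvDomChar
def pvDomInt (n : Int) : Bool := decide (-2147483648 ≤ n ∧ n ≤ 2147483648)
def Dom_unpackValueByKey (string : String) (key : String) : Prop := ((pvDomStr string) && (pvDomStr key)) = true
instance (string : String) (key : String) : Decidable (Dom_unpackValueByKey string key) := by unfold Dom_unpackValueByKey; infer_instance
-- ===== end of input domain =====

-- B searches the lines from the end and returns on the first match (early exit),
-- instead of A's full forward scan that keeps overwriting the last match.

-- shared helper: the four-prefix test both Pythons perform on a line
def pvKeyMatch (key tok : String) : Bool :=
  PySem.Str.startswith tok (key ++ " ") || PySem.Str.startswith tok (key ++ "=") ||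
  PySem.Str.startswith tok (key ++ "\t") || PySem.Str.startswith tok (key ++ ",")

-- tok[len(key)+1:]
def pvKeyVal (key tok : String) : String :=
  PySem.Str.slice tok (some ((PySem.Str.len key : Int) + 1)) none

-- ===== PORT A =====
-- forward scan, remembering the last matching line; the raise path ("[Key_Not_Found]")
-- is excluded by Pre_, the port returns "" there
def unpackValueByKey (string : String) (key : String) : String :=
  let lines := ((PySem.Str.split? string "\n").getD [])
  let retn := lines.foldl
    (fun r tok => if pvKeyMatch key tok then some (pvKeyVal key tok) else r)
    (none : Option String)
  retn.getD ""

-- ===== PORT B =====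
-- scan the reversed line list, return at the FIRST match; B raises on exhaustion
-- (same inputs A raises on, excluded by Pre_), the port returns "" there
def unpackValueByKeyAltGo (key : String) : List String → String
  | [] => ""
  | tok :: rest =>
    if pvKeyMatch key tok then pvKeyVal key tok else unpackValueByKeyAltGo key rest

def unpackValueByKey_alt (string : String) (key : String) : String :=
  unpackValueByKeyAltGo key (((PySem.Str.split? string "\n").getD [])).reverse

-- ===== PRECONDITION & SPEC =====
-- Pre_ excludes exactly the inputs where no line starts with key+" "/"="/"\t"/"," — there
-- both A and B raise Exception("[Key_Not_Found]").
def Pre_unpackValueByKey (string : String) (key : String) : Prop :=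
  (((PySem.Str.split? string "\n").getD [])).any (pvKeyMatch key) = true
instance (string : String) (key : String) : Decidable (Pre_unpackValueByKey string key) := by
  unfold Pre_unpackValueByKey; infer_instance

def pvWitness_unpackValueByKey : String × String := ("b=2\na=1\na=3", "a")

def Spec_unpackValueByKey (string : String) (key : String) (out : String) : Prop :=
  out = unpackValueByKey_alt string key
instance (string : String) (key : String) (out : String) : Decidable (Spec_unpackValueByKey string key out) := by
  unfold Spec_unpackValueByKey; infer_instance

-- ===== CLAIM (what is proved, stated in full; the proofs are below) =====
def Claim_equal_unpackValueByKey : Prop := ∀ (string : String) (key : String), Dom_unpackValueByKey string key → Pre_unpackValueByKey string key → Spec_unpackValueByKey string key (unpackValueByKey string key)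

-- ===== LEMMAS AND PROOFS =====

-- A's fold computes the LAST match = the first match of the reversed list
theorem pv_foldl_eq_find_reverse (key : String) (l : List String) (init : Option String) :
    l.foldl (fun r tok => if pvKeyMatch key tok then some (pvKeyVal key tok) else r) init
      = ((l.reverse.find? (pvKeyMatch key)).map (pvKeyVal key)).or init := by
  induction l generalizing init with
  | nil => simp
  | cons a l ih =>
    simp only [List.foldl_cons, List.reverse_cons, List.find?_append, ih]
    cases h : l.reverse.find? (pvKeyMatch key) with
    | some tok => simp
    | none =>
      cases hp : pvKeyMatch key a <;> simp [Option.or, List.find?, hp]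

-- B's loop computes the first match of its list
theorem pv_altGo_eq_find (key : String) (l : List String) :
    unpackValueByKeyAltGo key l = ((l.find? (pvKeyMatch key)).map (pvKeyVal key)).getD "" := by
  induction l with
  | nil => simp [unpackValueByKeyAltGo]
  | cons a l ih =>
    by_cases hp : pvKeyMatch key a = true
    · simp [unpackValueByKeyAltGo, List.find?, hp]
    · simp only [Bool.not_eq_true] at hp
      simp [unpackValueByKeyAltGo, List.find?, hp, ih]

-- ===== VERDICT (by name: the statement is the Claim_ definition above) =====
theorem unpackValueByKey_spec : Claim_equal_unpackValueByKey := by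
  intro string key _ _
  unfold Spec_unpackValueByKey unpackValueByKey unpackValueByKey_alt
  simp only []
  rw [pv_foldl_eq_find_reverse, pv_altGo_eq_find]
  cases h : (((PySem.Str.split? string "\n").getD [])).reverse.find? (pvKeyMatch key) <;>
    simp
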